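-- pv_equiv track=rewrite | github.com/civality/self-notes | 20-temporal-coalescing-index-materialization.py | get_processing_cost
-- ===== SOURCE A (Python) =====
-- def get_sublist_size(L, j, k):
--     count = 0
--     for posting in L:
--         if posting[2] > j and posting[1] < k:
--             count += 1
--     return count
--
-- def get_processing_cost(L, materialization_points):
--     materialization_points = materialization_points.copy()
--     materialization_points.add(0)
--     materialization_points.add(9) #todo: boundary elements will be inferred automatically
--
--     materialization_points = sorted(materialization_points)
--
--     total_cost = 0
--     for i in range(len(materialization_points)-1):
--         j = materialization_points[i]
--         k = materialization_points[i+1]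
--
--         total_cost += (k-j) * get_sublist_size(L,j,k)
--
--     return total_cost
-- ===== SOURCE B (Python) =====
-- def _count_lt(pts, x):
--     # number of elements of the sorted list pts that are < x (hand-rolled bisect_left)
--     lo, hi = 0, len(pts)
--     while lo < hi:
--         mid = (lo + hi) // 2
--         if pts[mid] < x:
--             lo = mid + 1
--         else:
--             hi = mid
--     return lo
--
-- def get_processing_cost(L, materialization_points):
--     pts = sorted(set(materialization_points) | {0, 9})
--     m = len(pts)
--     total = 0
--     for posting in L:
--         s = posting[1]
--         e = posting[2]
--         a = max(_count_lt(pts, s + 1) - 1, 0)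
--         b = min(_count_lt(pts, e), m - 1)
--         total += pts[b] - pts[a] if a < b else 0
--     return total
-- ===== Notes on version B (the rewrite author's own statement) =====
-- stated objective: faster
-- what changed: B swaps the summation order: instead of rescanning all postings once per consecutive pair of sorted materialization points, it does one binary search per posting over the sorted points and telescopes the overlapped interval lengths to a difference of two points.
import Mathlib
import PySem

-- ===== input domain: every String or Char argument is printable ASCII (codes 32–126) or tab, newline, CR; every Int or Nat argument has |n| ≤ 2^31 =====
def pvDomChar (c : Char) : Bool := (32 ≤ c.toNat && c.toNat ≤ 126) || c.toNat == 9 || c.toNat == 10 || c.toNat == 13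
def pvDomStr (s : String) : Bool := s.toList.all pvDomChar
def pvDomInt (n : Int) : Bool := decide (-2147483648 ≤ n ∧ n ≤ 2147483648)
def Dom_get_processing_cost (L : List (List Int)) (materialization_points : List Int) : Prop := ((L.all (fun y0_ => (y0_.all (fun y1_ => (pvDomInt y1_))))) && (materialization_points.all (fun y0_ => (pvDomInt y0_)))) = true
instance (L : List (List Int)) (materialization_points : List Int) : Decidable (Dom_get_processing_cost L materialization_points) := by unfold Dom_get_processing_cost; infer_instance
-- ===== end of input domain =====

-- B replaces A's per-interval rescans of all postings by one binary search per posting over the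
-- sorted point list (overlapped interval lengths telescope), an asymptotic speed-up.

-- ===== PORT A =====
-- posting[2] / posting[1]: pyGetD is exact under Pre_ (every posting has length ≥ 3);
-- Python raises IndexError on shorter postings, which Pre_ excludes.
def get_sublist_size (L : List (List Int)) (j k : Int) : Int :=
  L.foldl (fun count posting =>
    if PySem.List.pyGetD posting 2 0 > j ∧ PySem.List.pyGetD posting 1 0 < k
    then count + 1 else count) 0

def get_processing_cost (L : List (List Int)) (materialization_points : List Int) : Int :=
  let pts := PySem.List.sorted
    (PySem.Set.add (PySem.Set.add (PySem.Set.ofList materialization_points) 0) 9) (fun x => x)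
  (PySem.List.pyRange 0 ((pts.length : Int) - 1)).foldl
    (fun total i =>
      let j := PySem.List.pyGetD pts i 0
      let k := PySem.List.pyGetD pts (i + 1) 0
      total + (k - j) * get_sublist_size L j k) 0

-- ===== PORT B =====
-- hand-written binary search from Source B (_count_lt): lo, hi are Nat (Python keeps them in [0, len]);
-- (lo+hi)//2 on nonnegative ints is Nat division; pts[mid] with 0 ≤ mid < len is pyGetD, exact there.
def countLtLoop (pts : List Int) (x : Int) (lo hi : Nat) : Nat :=
  if _h : lo < hi then
    let mid := (lo + hi) / 2
    if PySem.List.pyGetD pts (mid : Int) 0 < x then countLtLoop pts x (mid + 1) hi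
    else countLtLoop pts x lo mid
  else lo
termination_by hi - lo
decreasing_by all_goals omega

def get_processing_cost_alt (L : List (List Int)) (materialization_points : List Int) : Int :=
  let pts := PySem.List.sorted
    (PySem.Set.add (PySem.Set.add (PySem.Set.ofList materialization_points) 0) 9) (fun x => x)
  let m := pts.length
  L.foldl (fun total posting =>
    let s := PySem.List.pyGetD posting 1 0
    let e := PySem.List.pyGetD posting 2 0
    let a : Int := max ((countLtLoop pts (s + 1) 0 m : Int) - 1) 0
    let b : Int := min ((countLtLoop pts e 0 m : Int)) ((m : Int) - 1)
    total + (if a < b then PySem.List.pyGetD pts b 0 - PySem.List.pyGetD pts a 0 else 0)) 0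

-- ===== PRECONDITION & SPEC =====
-- Pre_ excludes exactly the inputs where A raises: a posting shorter than 3 makes posting[2]
-- (always evaluated, since the sorted point set always contains 0 and 9) raise IndexError.
def Pre_get_processing_cost (L : List (List Int)) (materialization_points : List Int) : Prop :=
  ∀ posting ∈ L, 3 ≤ posting.length
instance (L : List (List Int)) (materialization_points : List Int) : Decidable (Pre_get_processing_cost L materialization_points) := by unfold Pre_get_processing_cost; infer_instance

def pvWitness_get_processing_cost : List (List Int) × List Int := ([[1, 2, 5], [0, 3, 8]], [4, 6])

def Spec_get_processing_cost (L : List (List Int)) (materialization_points : List Int) (out : Int) : Prop := out = get_processing_cost_alt L materialization_points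
instance (L : List (List Int)) (materialization_points : List Int) (out : Int) : Decidable (Spec_get_processing_cost L materialization_points out) := by unfold Spec_get_processing_cost; infer_instance

-- ===== CLAIM (what is proved, stated in full; the proofs are below) =====
def Claim_equal_get_processing_cost : Prop := ∀ (L : List (List Int)) (materialization_points : List Int), Dom_get_processing_cost L materialization_points → Pre_get_processing_cost L materialization_points → Spec_get_processing_cost L materialization_points (get_processing_cost L materialization_points)

-- ===== LEMMAS AND PROOFS =====

-- the two set-building routes (A's copy/add/add, B's set(..) | {0,9}) build the same set
lemma pts_eq (mp : List Int) :
    PySem.Set.add (PySem.Set.add (PySem.Set.ofList mp) 0) 9 = PySem.Set.ofList (mp ++ [0, 9]) := by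
  rw [PySem.Set.ofList_eq_foldl, PySem.Set.ofList_eq_foldl, List.foldl_append]
  rfl

-- invariant of the binary-search loop: it returns the number of elements < x
lemma countLtLoop_inv (P : List Int) (x : Int) (hP : P.Pairwise (· < ·)) :
    ∀ d lo hi, hi - lo = d → lo ≤ hi → hi ≤ P.length →
      (∀ i, i < lo → P.getD i 0 < x) →
      (∀ i, hi ≤ i → i < P.length → ¬ P.getD i 0 < x) →
      countLtLoop P x lo hi ≤ P.length ∧
        ∀ i, i < P.length → (P.getD i 0 < x ↔ i < countLtLoop P x lo hi) := by
  have hmono : ∀ i j, i ≤ j → j < P.length → P.getD i 0 ≤ P.getD j 0 := by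
    intro i j hij hj
    rcases eq_or_lt_of_le hij with rfl | hlt
    · exact le_rfl
    · have := (List.pairwise_iff_getElem.mp hP) i j (by omega) hj hlt
      rw [List.getD_eq_getElem _ _ (by omega), List.getD_eq_getElem _ _ hj]
      exact le_of_lt this
  intro d
  induction d using Nat.strong_induction_on with
  | _ d ih =>
    intro lo hi hd hlh hhi hlow hhigh
    rw [countLtLoop]
    by_cases h : lo < hi
    · rw [dif_pos h]
      simp only []
      have hmlt : (lo + hi) / 2 < P.length := by omega
      rw [PySem.List.pyGetD_natCast]
      by_cases hc : P.getD ((lo + hi) / 2) 0 < x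
      · rw [if_pos hc]
        exact ih (hi - ((lo + hi) / 2 + 1)) (by omega) _ _ rfl (by omega) hhi
          (fun i hi' => lt_of_le_of_lt (hmono i ((lo + hi) / 2) (by omega) hmlt) hc) hhigh
      · rw [if_neg hc]
        refine ih ((lo + hi) / 2 - lo) (by omega) _ _ rfl (by omega) (by omega) hlow ?_
        intro i h1 h2 hlt
        exact hc (lt_of_le_of_lt (hmono ((lo + hi) / 2) i h1 h2) hlt)
    · rw [dif_neg h]
      have : lo = hi := by omega
      subst this
      refine ⟨by omega, fun i hi' => ⟨fun hlt => ?_, fun hlt => hlow i hlt⟩⟩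
      by_contra hge
      exact hhigh i (by omega) hi' hlt

lemma countLtLoop_char (P : List Int) (x : Int) (hP : P.Pairwise (· < ·)) :
    countLtLoop P x 0 P.length ≤ P.length ∧
      ∀ i, i < P.length → (P.getD i 0 < x ↔ i < countLtLoop P x 0 P.length) := by
  exact countLtLoop_inv P x hP _ 0 P.length rfl (Nat.zero_le _) le_rfl
    (by omega) (by intro i h1 h2; omega)

-- exchanging the two summations
lemma swap_sums (L : List (List Int)) (n : Nat) (d : Nat → Int)
    (pred : Nat → List Int → Prop) [inst : ∀ i p, Decidable (pred i p)] :
    ((List.range n).map (fun i => d i * (L.countP (fun p => decide (pred i p)) : Int))).sum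
      = (L.map (fun p => ((List.range n).map (fun i => if pred i p then d i else 0)).sum)).sum := by
  induction L with
  | nil => simp
  | cons p L ih =>
    simp only [List.map_cons, List.sum_cons, List.countP_cons]
    have hfun : (fun i => d i * ((L.countP (fun q => decide (pred i q))
          + if decide (pred i p) = true then 1 else 0 : Nat) : Int))
        = (fun i => d i * (L.countP (fun q => decide (pred i q)) : Int)
            + (if pred i p then d i else 0)) := by
      funext i
      by_cases hp : pred i p <;> simp [hp, mul_add]
    rw [hfun, PySem.List.sum_map_add_int, ih]
    ring

-- the per-posting sum of overlapped interval lengths telescopes to B's two binary searches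
lemma per_posting (P : List Int) (hP : P.Pairwise (· < ·)) (h2 : 2 ≤ P.length) (s e : Int) :
    ((List.range (P.length - 1)).map (fun i =>
        if e > P.getD i 0 ∧ s < P.getD (i + 1) 0 then P.getD (i + 1) 0 - P.getD i 0 else 0)).sum
      = (if max ((countLtLoop P (s + 1) 0 P.length : Int) - 1) 0
            < min ((countLtLoop P e 0 P.length : Int)) ((P.length : Int) - 1)
         then PySem.List.pyGetD P (min ((countLtLoop P e 0 P.length : Int)) ((P.length : Int) - 1)) 0
              - PySem.List.pyGetD P (max ((countLtLoop P (s + 1) 0 P.length : Int) - 1) 0) 0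
         else 0) := by
  obtain ⟨hbl_le, hblc⟩ := countLtLoop_char P e hP
  obtain ⟨hbr_le, hbrc⟩ := countLtLoop_char P (s + 1) hP
  set n := P.length with hn
  set bl := countLtLoop P e 0 n with hbldef
  set br := countLtLoop P (s + 1) 0 n with hbrdef
  set a' : Nat := br - 1 with ha'
  set b' : Nat := min bl (n - 1) with hb'
  have hA : max ((br : Int) - 1) 0 = ((a' : Nat) : Int) := by omega
  have hB : min ((bl : Int)) ((n : Int) - 1) = ((b' : Nat) : Int) := by omega
  have hcong : (List.range (n - 1)).map (fun i =>
        if e > P.getD i 0 ∧ s < P.getD (i + 1) 0 then P.getD (i + 1) 0 - P.getD i 0 else 0)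
      = (List.range (n - 1)).map (fun i =>
        if a' ≤ i ∧ i < b' then P.getD (i + 1) 0 - P.getD i 0 else 0) := by
    refine List.map_congr_left ?_
    intro i hi
    rw [List.mem_range] at hi
    have h1 : P.getD i 0 < e ↔ i < bl := hblc i (by omega)
    have h2 : P.getD (i + 1) 0 < s + 1 ↔ i + 1 < br := hbrc (i + 1) (by omega)
    by_cases hc : a' ≤ i ∧ i < b'
    · rw [if_pos hc, if_pos ⟨by omega, by omega⟩]
    · rw [if_neg hc, if_neg (by intro ⟨hx, hy⟩; exact hc ⟨by omega, by omega⟩)]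
  rw [hcong, hA, hB]
  have hbridge : ((List.range (n - 1)).map (fun i =>
        if a' ≤ i ∧ i < b' then P.getD (i + 1) 0 - P.getD i 0 else 0)).sum
      = ∑ i ∈ Finset.range (n - 1), (if a' ≤ i ∧ i < b' then P.getD (i + 1) 0 - P.getD i 0 else 0) := rfl
  by_cases hab : a' < b'
  · rw [if_pos (by exact_mod_cast hab)]
    rw [hbridge, ← Finset.sum_filter]
    have hfil : (Finset.range (n - 1)).filter (fun i => a' ≤ i ∧ i < b') = Finset.Ico a' b' := by
      ext i
      simp only [Finset.mem_filter, Finset.mem_range, Finset.mem_Ico]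
      omega
    rw [hfil, Finset.sum_Ico_eq_sub _ (le_of_lt hab),
      Finset.sum_range_sub (fun i => P.getD i 0), Finset.sum_range_sub (fun i => P.getD i 0)]
    rw [PySem.List.pyGetD_natCast, PySem.List.pyGetD_natCast]
    ring
  · rw [if_neg (by exact_mod_cast hab), hbridge]
    exact Finset.sum_eq_zero (fun i _ => if_neg (by omega))

lemma two_le_len {P : List Int} (h0 : (0 : Int) ∈ P) (h9 : (9 : Int) ∈ P) : 2 ≤ P.length := by
  rcases P with _ | ⟨x, _ | ⟨y, t⟩⟩
  · simp at h0
  · simp at h0 h9; omega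
  · simp

-- ===== VERDICT (by name: the statement is the Claim_ definition above) =====
theorem get_processing_cost_spec : Claim_equal_get_processing_cost := by
  intro L mp _hdom _hpre
  unfold Spec_get_processing_cost get_processing_cost get_processing_cost_alt
  simp only [pts_eq]
  set P := PySem.List.sorted (PySem.Set.ofList (mp ++ [0, 9])) (fun x => x) with hPdef
  have hP : P.Pairwise (· < ·) := PySem.List.sorted_ofList_pairwise_lt _
  have h0 : (0 : Int) ∈ P := by
    rw [hPdef, PySem.List.mem_sorted, PySem.Set.mem_ofList]; simp
  have h9 : (9 : Int) ∈ P := by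
    rw [hPdef, PySem.List.mem_sorted, PySem.Set.mem_ofList]; simp
  have h2 : 2 ≤ P.length := two_le_len h0 h9
  rw [PySem.List.pyRange_one]
  have htn : ((P.length : Int) - 1 - 0).toNat = P.length - 1 := by omega
  rw [htn, List.foldl_map, PySem.List.foldl_add, PySem.List.foldl_add]
  simp only [zero_add]
  have hAmap : (List.range (P.length - 1)).map (fun (k : Nat) =>
        (PySem.List.pyGetD P ((k : Int) + 1) 0 - PySem.List.pyGetD P ((k : Int)) 0)
          * get_sublist_size L (PySem.List.pyGetD P ((k : Int)) 0)
              (PySem.List.pyGetD P ((k : Int) + 1) 0))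
      = (List.range (P.length - 1)).map (fun k =>
        (P.getD (k + 1) 0 - P.getD k 0)
          * (L.countP (fun p => decide (PySem.List.pyGetD p 2 0 > P.getD k 0
              ∧ PySem.List.pyGetD p 1 0 < P.getD (k + 1) 0)) : Int)) := by
    refine List.map_congr_left ?_
    intro k _
    have hc2 : ((k : Int) + 1) = (((k + 1 : Nat)) : Int) := by push_cast; ring
    rw [hc2, PySem.List.pyGetD_natCast, PySem.List.pyGetD_natCast]
    unfold get_sublist_size
    rw [PySem.List.foldl_ite_add_one]
    simp only [zero_add]
  rw [hAmap,
    swap_sums L (P.length - 1) (fun k => P.getD (k + 1) 0 - P.getD k 0)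
      (fun k p => PySem.List.pyGetD p 2 0 > P.getD k 0 ∧ PySem.List.pyGetD p 1 0 < P.getD (k + 1) 0)]
  refine congrArg List.sum (List.map_congr_left ?_)
  intro p _
  exact per_posting P hP h2 (PySem.List.pyGetD p 1 0) (PySem.List.pyGetD p 2 0)
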